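-- pv_equiv track=rewrite | github.com/Pedro-Luucas/estudo | obi/candidatas.py | candidata
-- ===== SOURCE A (Python) =====
-- def gcd(a, b):
--     while b != 0:
--         a, b = b, a % b
--     return a
--
-- def candidata(arr = []):
--     count = 0
--     lengh = len(arr)
--     for i in range(0,lengh+1):
--         for j in range(i,lengh):
--
--             subseq = arr[i:j+1]
--             compare = subseq[0]
--             for num in subseq:
--                 compare = gcd(compare, num)
--             if compare>1:
--                 count+=1
--
--     return count
-- ===== SOURCE B (Python) =====
-- def gcd(a, b):
--     while b != 0:
--         a, b = b, a % b
--     return a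
--
-- def candidata(arr = []):
--     # Incremental running gcd per start index: O(n^2) gcd calls instead of
--     # recomputing the gcd of every slice from scratch (A is O(n^3)).
--     count = 0
--     n = len(arr)
--     for i in range(n):
--         g = arr[i]
--         for j in range(i, n):
--             g = gcd(g, arr[j])
--             if g > 1:
--                 count += 1
--     return count
-- ===== Notes on version B (the rewrite author's own statement) =====
-- stated objective: faster
-- what changed: B keeps one running gcd per start index and extends it by one element per step, instead of re-slicing and re-folding the whole subarray for every (i,j) pair.
import Mathlib
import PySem

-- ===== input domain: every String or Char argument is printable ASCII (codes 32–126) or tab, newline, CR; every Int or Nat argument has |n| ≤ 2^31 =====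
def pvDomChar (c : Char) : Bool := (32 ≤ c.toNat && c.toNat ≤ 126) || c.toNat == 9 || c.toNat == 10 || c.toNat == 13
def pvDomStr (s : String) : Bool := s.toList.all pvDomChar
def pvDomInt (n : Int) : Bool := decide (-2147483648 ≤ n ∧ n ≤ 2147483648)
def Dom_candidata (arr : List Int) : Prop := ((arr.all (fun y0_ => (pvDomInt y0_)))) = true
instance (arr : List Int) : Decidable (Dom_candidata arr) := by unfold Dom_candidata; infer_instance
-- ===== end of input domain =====

-- B replaces A's slice-and-refold per pair (i,j) by one running gcd per start index i (asymptotically faster; return value identical).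

-- Python's hand-written Euclid with floor-mod (shared module helper `gcd`); termination: |a % b| < |b| for b ≠ 0.
theorem pymod_natAbs_lt (a b : Int) (h : b ≠ 0) : (PySem.Int.mod a b).natAbs < b.natAbs := by
  rcases lt_trichotomy b 0 with hb | hb | hb
  · have := PySem.Int.mod_neg_bounds a hb
    omega
  · exact absurd hb h
  · have h1 := PySem.Int.mod_nonneg a hb
    have h2 := PySem.Int.mod_lt a hb
    omega

def pygcd (a b : Int) : Int :=
  if _h : b = 0 then a else pygcd b (PySem.Int.mod a b)
termination_by b.natAbs
decreasing_by exact pymod_natAbs_lt a b _h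

-- ===== PORT A =====
-- subseq[0] is ported with pyGetD: the index is always in range (i ≤ j < len, so subseq ≠ []).
def candidata (arr : List Int) : Int :=
  let lengh : Int := arr.length
  (PySem.List.pyRange 0 (lengh + 1) 1).foldl (fun count i =>
    (PySem.List.pyRange i lengh 1).foldl (fun count j =>
      let subseq := PySem.List.slice arr (some i) (some (j + 1))
      let compare := subseq.foldl pygcd (PySem.List.pyGetD subseq 0 0)
      if compare > 1 then count + 1 else count) count) 0

-- ===== PORT B =====
-- arr[i] / arr[j] ported with pyGetD: i, j range over 0 ≤ i ≤ j < len, always in range.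
def candidata_alt (arr : List Int) : Int :=
  let n : Int := arr.length
  (PySem.List.pyRange 0 n 1).foldl (fun count i =>
    ((PySem.List.pyRange i n 1).foldl (fun (s : Int × Int) j =>
      let g := pygcd s.1 (PySem.List.pyGetD arr j 0)
      (g, if g > 1 then s.2 + 1 else s.2)) (PySem.List.pyGetD arr i 0, count)).2) 0

-- ===== PRECONDITION & SPEC =====
def Spec_candidata (arr : List Int) (out : Int) : Prop := out = candidata_alt arr
instance (arr : List Int) (out : Int) : Decidable (Spec_candidata arr out) := by unfold Spec_candidata; infer_instance

-- ===== CLAIM (what is proved, stated in full; the proofs are below) =====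
def Claim_equal_candidata : Prop := ∀ (arr : List Int), Dom_candidata arr → Spec_candidata arr (candidata arr)

-- ===== LEMMAS AND PROOFS =====

-- running gcd over arr[i:k], seeded with arr[i] (the value B's inner state g holds after step k-1)
def runG (arr : List Int) (i k : Nat) : Int :=
  ((arr.drop i).take (k - i)).foldl pygcd (arr.getD i 0)

theorem runG_base (arr : List Int) (i : Nat) : runG arr i i = arr.getD i 0 := by
  simp [runG]

theorem runG_step (arr : List Int) (i k : Nat) (h1 : i ≤ k) (h2 : k < arr.length) :
    runG arr i (k + 1) = pygcd (runG arr i k) (arr.getD k 0) := by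
  unfold runG
  rw [show k + 1 - i = (k - i) + 1 by omega, List.take_add_one]
  have hget : (arr.drop i)[k - i]? = some (arr.getD k 0) := by
    rw [List.getElem?_drop, show i + (k - i) = k by omega,
      List.getElem?_eq_getElem h2, List.getD_eq_getElem arr 0 h2]
  rw [hget]
  simp

theorem sub0 (arr : List Int) (i k : Nat) (h1 : i ≤ k) :
    PySem.List.pyGetD ((arr.drop i).take (k + 1 - i)) 0 0 = arr.getD i 0 := by
  rw [PySem.List.pyGetD_zero]
  rw [List.getD_eq_getElem?_getD, List.getD_eq_getElem?_getD,
    List.getElem?_take_of_lt (by omega), List.getElem?_drop, Nat.add_zero]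

theorem inner_eq (arr : List Int) (i k : Nat) (c : Int) (h1 : i ≤ k) (h2 : k ≤ arr.length) :
    (PySem.List.pyRange (k : Int) (arr.length : Int) 1).foldl
      (fun count j =>
        let subseq := PySem.List.slice arr (some (i : Int)) (some (j + 1))
        let compare := subseq.foldl pygcd (PySem.List.pyGetD subseq 0 0)
        if compare > 1 then count + 1 else count) c
    = ((PySem.List.pyRange (k : Int) (arr.length : Int) 1).foldl
        (fun (s : Int × Int) j =>
          let g := pygcd s.1 (PySem.List.pyGetD arr j 0)
          (g, if g > 1 then s.2 + 1 else s.2)) (runG arr i k, c)).2 := by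
  have main : ∀ (m k : Nat) (c : Int), i ≤ k → k ≤ arr.length → arr.length - k = m →
      (PySem.List.pyRange (k : Int) (arr.length : Int) 1).foldl
        (fun count j =>
          let subseq := PySem.List.slice arr (some (i : Int)) (some (j + 1))
          let compare := subseq.foldl pygcd (PySem.List.pyGetD subseq 0 0)
          if compare > 1 then count + 1 else count) c
      = ((PySem.List.pyRange (k : Int) (arr.length : Int) 1).foldl
          (fun (s : Int × Int) j =>
            let g := pygcd s.1 (PySem.List.pyGetD arr j 0)
            (g, if g > 1 then s.2 + 1 else s.2)) (runG arr i k, c)).2 := by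
    intro m
    induction m with
    | zero =>
      intro k c hik hkn hm
      rw [PySem.List.pyRange_one_eq_nil (by exact_mod_cast Nat.le_of_sub_eq_zero hm)]
      simp
    | succ m ih =>
      intro k c hik hkn hm
      have hk : k < arr.length := by omega
      rw [PySem.List.pyRange_one_cons (by exact_mod_cast hk)]
      simp only [List.foldl_cons]
      have hsub : PySem.List.slice arr (some (i : Int)) (some ((k : Int) + 1)) =
          (arr.drop i).take (k + 1 - i) := by
        rw [show ((k : Int) + 1) = ((k + 1 : Nat) : Int) by push_cast; ring]
        exact PySem.List.slice_natCast arr i (k + 1)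
      rw [hsub, sub0 arr i k hik,
        show ((arr.drop i).take (k + 1 - i)).foldl pygcd (arr.getD i 0) = runG arr i (k + 1) from rfl,
        PySem.List.pyGetD_natCast, ← runG_step arr i k hik hk]
      rw [show ((k : Int) + 1) = ((k + 1 : Nat) : Int) by push_cast; ring]
      exact ih (k + 1) _ (by omega) (by omega) (by omega)
  exact main (arr.length - k) k c h1 h2 rfl

-- ===== VERDICT (by name: the statement is the Claim_ definition above) =====
theorem candidata_spec : Claim_equal_candidata := by
  intro arr _
  unfold Spec_candidata candidata candidata_alt
  simp only []
  rw [show ((arr.length : Int) + 1) = ((arr.length : Int)) + 1 from rfl]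
  rw [PySem.List.pyRange_one_succ_right (by positivity), List.foldl_append]
  simp only [List.foldl_cons, List.foldl_nil]
  rw [PySem.List.pyRange_one_eq_nil (le_refl _), List.foldl_nil]
  apply PySem.List.foldl_congr_mem
  intro c x hx
  have hx' := (PySem.List.mem_pyRange_one).1 hx
  obtain ⟨h0, hlt⟩ := hx'
  have hxe : x = ((x.toNat : Nat) : Int) := by omega
  rw [hxe]
  rw [inner_eq arr x.toNat x.toNat c (le_refl _) (by omega),
    PySem.List.pyGetD_natCast, ← runG_base arr x.toNat]
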